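-- pv_equiv track=rewrite | github.com/disoardi/cert-checker | cert_checker/checker/remote.py | _match_hostname
-- ===== SOURCE A (Python) =====
-- def _match_hostname(pattern: str, hostname: str) -> bool:
--     """
--     Match hostname against certificate pattern (supports wildcards).
--
--     Args:
--         pattern: Pattern from certificate (may contain *)
--         hostname: Hostname to check
--
--     Returns:
--         True if matches
--     """
--     pattern = pattern.lower()
--     hostname = hostname.lower()
--
--     # Exact match
--     if pattern == hostname:
--         return True
--
--     # Wildcard match
--     if pattern.startswith("*."):
--         pattern_parts = pattern.split(".")
--         hostname_parts = hostname.split(".")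
--
--         # Must have same number of parts
--         if len(pattern_parts) != len(hostname_parts):
--             return False
--
--         # Check non-wildcard parts
--         for p, h in zip(pattern_parts[1:], hostname_parts[1:]):
--             if p != h:
--                 return False
--
--         return True
--
--     return False
-- ===== SOURCE B (Python) =====
-- def _match_hostname(pattern: str, hostname: str) -> bool:
--     """
--     Match hostname against certificate pattern (supports wildcards).
--
--     Loop-free re-implementation: in the wildcard branch a single suffix test
--     plus an equal dot-count check replaces splitting both strings into parts
--     and comparing them label by label.
--     """
--     pattern = pattern.lower()
--     hostname = hostname.lower()
--
--     if pattern == hostname: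
--         return True
--
--     if pattern.startswith("*."):
--         # endswith checks every non-wildcard label; equal dot counts
--         # enforce the same number of parts.
--         return hostname.endswith(pattern[1:]) and hostname.count(".") == pattern.count(".")
--
--     return False
-- ===== Notes on version B (the rewrite author's own statement) =====
-- stated objective: simpler
-- what changed: The wildcard branch's split-both-strings-and-loop-over-labels check is replaced by a single suffix test hostname.endswith(pattern[1:]) plus an equal dot-count check; no splitting and no loop remain.
import Mathlib
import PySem

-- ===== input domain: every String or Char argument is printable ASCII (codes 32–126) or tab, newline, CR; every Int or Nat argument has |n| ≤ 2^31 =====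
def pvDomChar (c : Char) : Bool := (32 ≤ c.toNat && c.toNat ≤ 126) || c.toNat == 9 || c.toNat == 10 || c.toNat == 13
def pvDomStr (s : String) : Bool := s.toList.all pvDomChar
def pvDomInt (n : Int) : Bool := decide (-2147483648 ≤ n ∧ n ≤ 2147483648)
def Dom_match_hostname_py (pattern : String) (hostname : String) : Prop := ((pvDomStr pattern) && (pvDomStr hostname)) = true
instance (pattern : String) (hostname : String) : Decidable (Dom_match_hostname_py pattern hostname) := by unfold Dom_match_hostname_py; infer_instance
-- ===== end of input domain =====

-- B replaces the wildcard branch's split-into-labels loop by one suffix test plus an equal dot-count check (simpler, loop-free).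


-- ===== PORT A =====
-- the 'for p, h in zip(pattern_parts[1:], hostname_parts[1:]): if p != h: return False' loop
def pvZipLoop : List (List Char × List Char) → Bool
  | [] => true
  | (pe, he) :: rest => if pe ≠ he then false else pvZipLoop rest

def match_hostname_py (pattern : String) (hostname : String) : Bool :=
  let p := PySem.Chars.lower pattern.toList
  let h := PySem.Chars.lower hostname.toList
  if p = h then true
  else if PySem.Chars.startswith p ['*', '.'] then
    let patternParts := PySem.Chars.splitOn p ['.']
    let hostnameParts := PySem.Chars.splitOn h ['.']
    if patternParts.length ≠ hostnameParts.length then false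
    else pvZipLoop (List.zip (PySem.List.slice patternParts (some 1) none)
                             (PySem.List.slice hostnameParts (some 1) none))
  else false

-- ===== PORT B =====
def match_hostname_py_alt (pattern : String) (hostname : String) : Bool :=
  let p := PySem.Chars.lower pattern.toList
  let h := PySem.Chars.lower hostname.toList
  if p = h then true
  else if PySem.Chars.startswith p ['*', '.'] then
    PySem.Chars.endswith h (PySem.List.slice p (some 1) none)
      && (PySem.Chars.count h ['.'] == PySem.Chars.count p ['.'])
  else false

-- ===== PRECONDITION & SPEC =====
def Spec_match_hostname_py (pattern : String) (hostname : String) (out : Bool) : Prop := out = match_hostname_py_alt pattern hostname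
instance (pattern : String) (hostname : String) (out : Bool) : Decidable (Spec_match_hostname_py pattern hostname out) := by unfold Spec_match_hostname_py; infer_instance

-- ===== CLAIM (what is proved, stated in full; the proofs are below) =====
def Claim_equal_match_hostname_py : Prop := ∀ (pattern : String) (hostname : String), Dom_match_hostname_py pattern hostname → Spec_match_hostname_py pattern hostname (match_hostname_py pattern hostname)

-- ===== LEMMAS AND PROOFS =====

-- reference split of a char list at '.' (what Python's s.split(".") computes)
def pvConsHead (pre : List Char) : List (List Char) → List (List Char)
  | [] => [pre]
  | x :: xs => (pre ++ x) :: xs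

def pvSplit : List Char → List (List Char)
  | [] => [[]]
  | a :: s => if a = '.' then [] :: pvSplit s else pvConsHead [a] (pvSplit s)

def pvUnsplit : List (List Char) → List Char
  | [] => []
  | [x] => x
  | x :: xs => x ++ '.' :: pvUnsplit xs

theorem pvSplit_ne_nil (s : List Char) : pvSplit s ≠ [] := by
  induction s with
  | nil => simp [pvSplit]
  | cons a s ih =>
    simp only [pvSplit]
    split
    · simp
    · cases h : pvSplit s with
      | nil => exact absurd h ih
      | cons x xs => simp [pvConsHead]

theorem pvConsHead_consHead (p q : List Char) (m : List (List Char)) (hm : m ≠ []) :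
    pvConsHead p (pvConsHead q m) = pvConsHead (p ++ q) m := by
  cases m with
  | nil => exact absurd rfl hm
  | cons x xs => simp [pvConsHead]

theorem pvConsHead_nil (m : List (List Char)) (hm : m ≠ []) : pvConsHead [] m = m := by
  cases m with
  | nil => exact absurd rfl hm
  | cons x xs => simp [pvConsHead]

-- PySem's count.go with sub = ['.'] counts dots
theorem pvCountGo (fuel : Nat) (l : List Char) (acc : Nat) (hf : l.length ≤ fuel) :
    PySem.Chars.count.go ['.'] fuel l acc = acc + l.count '.' := by
  induction fuel generalizing l acc with
  | zero =>
    interval_cases hl : l.length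
    simp_all [List.length_eq_zero_iff, PySem.Chars.count.go]
  | succ fuel ih =>
    cases l with
    | nil => simp [PySem.Chars.count.go]
    | cons c rest =>
      simp only [List.length_cons] at hf
      have h1 := ih rest (acc + 1) (by omega)
      have h2 := ih rest acc (by omega)
      by_cases hc : c = '.'
      · subst hc
        simp [PySem.Chars.count.go, List.isPrefixOf, h1]
        omega
      · have hbc : ('.' == c) = false := by
          simp; exact fun h => hc h.symm
        simp [PySem.Chars.count.go, List.isPrefixOf, hbc, h2, List.count_cons]
        exact hc

theorem pvCountDot (s : List Char) : PySem.Chars.count s ['.'] = s.count '.' := by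
  simp only [PySem.Chars.count, List.isEmpty_cons, Bool.false_eq_true, if_neg, not_false_iff]
  simpa using pvCountGo s.length s 0 le_rfl

-- PySem's splitOn.go with sep = ['.'] computes pvSplit (accumulator form)
theorem pvSplitGo (fuel : Nat) (l cur : List Char) (acc : List (List Char)) (hf : l.length ≤ fuel) :
    PySem.Chars.splitOn.go ['.'] fuel l cur acc = acc.reverse ++ pvConsHead cur.reverse (pvSplit l) := by
  induction fuel generalizing l cur acc with
  | zero =>
    interval_cases hl : l.length
    rw [List.length_eq_zero_iff] at hl
    subst hl
    simp [PySem.Chars.splitOn.go, pvSplit, pvConsHead]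
  | succ fuel ih =>
    cases l with
    | nil => simp [PySem.Chars.splitOn.go, pvSplit, pvConsHead]
    | cons c rest =>
      simp only [List.length_cons] at hf
      by_cases hc : c = '.'
      · subst hc
        have hpre : List.isPrefixOf ['.'] ('.' :: rest) = true := by simp [List.isPrefixOf]
        simp only [PySem.Chars.splitOn.go, hpre, if_pos, List.length_singleton,
          List.drop_succ_cons, List.drop_zero]
        rw [ih rest [] (cur.reverse :: acc) (by omega)]
        simp only [pvSplit, List.reverse_cons, List.reverse_nil]
        rw [pvConsHead_nil _ (pvSplit_ne_nil rest)]
        simp [pvConsHead]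
      · have hpre : List.isPrefixOf ['.'] (c :: rest) = false := by
          simp [List.isPrefixOf]
          intro h; exact absurd h.symm hc
        simp only [PySem.Chars.splitOn.go, hpre, Bool.false_eq_true, if_neg, not_false_iff]
        rw [ih rest (c :: cur) acc (by omega)]
        simp only [pvSplit, if_neg hc, List.reverse_cons]
        rw [pvConsHead_consHead _ _ _ (pvSplit_ne_nil rest)]

theorem pvSplitOnDot (s : List Char) : PySem.Chars.splitOn s ['.'] = pvSplit s := by
  simp only [PySem.Chars.splitOn]
  rw [pvSplitGo (s.length + 1) s [] [] (by omega)]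
  simp [pvConsHead_nil _ (pvSplit_ne_nil s)]

theorem pvSplit_length (s : List Char) : (pvSplit s).length = s.count '.' + 1 := by
  induction s with
  | nil => simp [pvSplit]
  | cons a s ih =>
    simp only [pvSplit]
    by_cases ha : a = '.'
    · subst ha; simp [ih]
    · simp only [if_neg ha]
      cases h : pvSplit s with
      | nil => exact absurd h (pvSplit_ne_nil s)
      | cons x xs =>
        rw [h] at ih
        simp only [pvConsHead, List.length_cons] at *
        simp [ha, ih]

theorem pvUnsplit_split (s : List Char) : pvUnsplit (pvSplit s) = s := by
  induction s with
  | nil => simp [pvSplit, pvUnsplit]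
  | cons a s ih =>
    simp only [pvSplit]
    by_cases ha : a = '.'
    · subst ha
      cases h : pvSplit s with
      | nil => exact absurd h (pvSplit_ne_nil s)
      | cons x xs =>
        rw [h] at ih
        simp [pvUnsplit, ih]
    · simp only [if_neg ha]
      cases h : pvSplit s with
      | nil => exact absurd h (pvSplit_ne_nil s)
      | cons x xs =>
        rw [h] at ih
        cases xs with
        | nil => simpa [pvConsHead, pvUnsplit] using congrArg (a :: ·) ih
        | cons y ys => simpa [pvConsHead, pvUnsplit] using congrArg (a :: ·) ih

-- splitting off a dot-free prefix
theorem pvSplit_dotfree_prefix (w t : List Char) (hw : w.count '.' = 0) :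
    pvSplit (w ++ '.' :: t) = w :: pvSplit t := by
  induction w with
  | nil => simp [pvSplit]
  | cons a w ih =>
    simp only [List.count_cons] at hw
    have ha : a ≠ '.' := by intro h; simp_all
    have hw0 : w.count '.' = 0 := by by_cases h : '.' = a <;> simp at hw <;> omega
    simp [pvSplit, ha, ih hw0, pvConsHead]

-- every list with a dot splits at its first dot
theorem pvExists_first_dot (s : List Char) (hs : 0 < s.count '.') :
    ∃ w t, w.count '.' = 0 ∧ s = w ++ '.' :: t := by
  induction s with
  | nil => simp at hs
  | cons a s ih =>
    by_cases ha : a = '.'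
    · exact ⟨[], s, by simp, by simp [ha]⟩
    · have hs' : 0 < s.count '.' := by simp_all
      obtain ⟨w, t, hw, hst⟩ := ih hs'
      refine ⟨a :: w, t, ?_, by simp [hst]⟩
      simp_all

-- cancellation of dot-free prefixes
theorem pvDotfree_cancel (a b x y : List Char) (ha : a.count '.' = 0) (hb : b.count '.' = 0)
    (h : a ++ '.' :: x = b ++ '.' :: y) : a = b ∧ x = y := by
  induction a generalizing b with
  | nil =>
    cases b with
    | nil => simpa using h
    | cons c b =>
      simp only [List.nil_append, List.cons_append, List.cons.injEq] at h
      exfalso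
      simp [← h.1] at hb
  | cons c a ih =>
    cases b with
    | nil =>
      simp only [List.cons_append, List.nil_append, List.cons.injEq] at h
      exfalso
      simp [h.1] at ha
    | cons d b =>
      simp only [List.cons_append, List.cons.injEq] at h
      have ha0 : a.count '.' = 0 := by
        simp only [List.count_cons] at ha; by_cases hh : '.' = c <;> simp at ha <;> omega
      have hb0 : b.count '.' = 0 := by
        simp only [List.count_cons] at hb; by_cases hh : '.' = d <;> simp at hb <;> omega
      obtain ⟨h1, h2⟩ := ih b ha0 hb0 h.2
      exact ⟨by rw [h.1, h1], h2⟩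

-- the zip loop on equal-length lists is list equality
theorem pvZipLoop_eq (xs ys : List (List Char)) (hl : xs.length = ys.length) :
    pvZipLoop (List.zip xs ys) = decide (xs = ys) := by
  induction xs generalizing ys with
  | nil =>
    cases ys with
    | nil => simp [pvZipLoop]
    | cons y ys => simp at hl
  | cons x xs ih =>
    cases ys with
    | nil => simp at hl
    | cons y ys =>
      simp only [List.zip_cons_cons, pvZipLoop]
      by_cases hxy : x = y
      · subst hxy
        rw [if_neg (by simp)]
        rw [ih ys (by simpa using hl)]
        simp
      · simp [hxy]

-- the wildcard branch: split-and-loop equals suffix-plus-dot-count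
theorem pvBranch (P' H : List Char) :
    (if (pvSplit ('*' :: '.' :: P')).length ≠ (pvSplit H).length then false
     else pvZipLoop (List.zip ((pvSplit ('*' :: '.' :: P')).tail) ((pvSplit H).tail)))
    = (decide (('.' :: P') <:+ H) && (H.count '.' == ('*' :: '.' :: P').count '.')) := by
  have hP : pvSplit ('*' :: '.' :: P') = ['*'] :: pvSplit P' := by
    simp [pvSplit, pvConsHead]
  have hcP : ('*' :: '.' :: P').count '.' = P'.count '.' + 1 := by
    simp
  by_cases hcnt : H.count '.' = P'.count '.' + 1
  · -- dot counts agree: lengths agree, reduce to tail equality vs suffix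
    have hlen : (pvSplit ('*' :: '.' :: P')).length = (pvSplit H).length := by
      rw [hP]
      simp [List.length_cons, pvSplit_length, hcnt]
    rw [if_neg (by simp [hlen])]
    obtain ⟨w, t, hw, hst⟩ := pvExists_first_dot H (by omega)
    have hsplitH : pvSplit H = w :: pvSplit t := by rw [hst]; exact pvSplit_dotfree_prefix w t hw
    have hct : t.count '.' = P'.count '.' := by
      rw [hst] at hcnt
      simp [List.count_append, hw] at hcnt
      omega
    rw [hP, hsplitH]
    simp only [List.tail_cons]
    rw [pvZipLoop_eq _ _ (by simp [pvSplit_length, hct])]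
    have hiff : pvSplit P' = pvSplit t ↔ ('.' :: P') <:+ H := by
      constructor
      · intro h
        have : P' = t := by
          have := congrArg pvUnsplit h
          rwa [pvUnsplit_split, pvUnsplit_split] at this
        subst this
        exact ⟨w, hst.symm⟩
      · rintro ⟨u, hu⟩
        have hu' : u ++ '.' :: P' = w ++ '.' :: t := by rw [hu, hst]
        have hcu : u.count '.' = 0 := by
          have := congrArg (List.count '.') hu'
          simp [List.count_append, hw, hct] at this
          omega
        obtain ⟨-, h2⟩ := pvDotfree_cancel u w P' t hcu hw hu'
        rw [h2]
    simp only [hcnt, hcP, beq_self_eq_true, Bool.and_true]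
    by_cases h : pvSplit P' = pvSplit t
    · simp [h, hiff.mp h]
    · simp [h]
      intro hs
      exact h (hiff.mpr hs)
  · -- dot counts differ: lengths differ, both sides false
    have : (pvSplit ('*' :: '.' :: P')).length ≠ (pvSplit H).length := by
      rw [hP]
      simp [List.length_cons, pvSplit_length]
      omega
    rw [if_pos this]
    have hb : (H.count '.' == ('*' :: '.' :: P').count '.') = false := by
      simp [hcP]; omega
    simp only [hb, Bool.and_false]

-- the two function bodies agree for arbitrary lowered char lists
theorem pvCore (p h : List Char) :
    (if p = h then true
     else if PySem.Chars.startswith p ['*', '.'] then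
       (if (PySem.Chars.splitOn p ['.']).length ≠ (PySem.Chars.splitOn h ['.']).length then false
        else pvZipLoop (List.zip (PySem.List.slice (PySem.Chars.splitOn p ['.']) (some 1) none)
                                 (PySem.List.slice (PySem.Chars.splitOn h ['.']) (some 1) none)))
     else false)
    = (if p = h then true
       else if PySem.Chars.startswith p ['*', '.'] then
         PySem.Chars.endswith h (PySem.List.slice p (some 1) none)
           && (PySem.Chars.count h ['.'] == PySem.Chars.count p ['.'])
       else false) := by
  by_cases heq : p = h
  · simp [heq]
  · simp only [if_neg heq]
    by_cases hsw : PySem.Chars.startswith p ['*', '.'] = true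
    · rw [if_pos hsw, if_pos hsw]
      have hpre : ['*', '.'] <+: p := List.isPrefixOf_iff_prefix.mp hsw
      obtain ⟨P', hP'⟩ := hpre
      subst hP'
      simp only [List.cons_append, List.nil_append]
      rw [pvSplitOnDot, pvSplitOnDot, PySem.List.slice_from_one, PySem.List.slice_from_one,
        PySem.List.slice_from_one]
      simp only [List.tail_cons]
      rw [pvBranch P' h, pvCountDot, pvCountDot]
      congr 1
      have := PySem.Chars.endswith_iff h ('.' :: P')
      by_cases hs : ('.' :: P') <:+ h
      · simp [hs, this]
      · simp only [hs, decide_false]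
        rcases hb : PySem.Chars.endswith h ('.' :: P') with _ | _
        · rfl
        · exact absurd (this.mp hb) hs
    · simp [hsw]

-- ===== VERDICT (by name: the statement is the Claim_ definition above) =====
theorem match_hostname_py_spec : Claim_equal_match_hostname_py := by
  intro pattern hostname _
  unfold Spec_match_hostname_py match_hostname_py match_hostname_py_alt
  exact pvCore (PySem.Chars.lower pattern.toList) (PySem.Chars.lower hostname.toList)
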